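-- pv_equiv track=rewrite | github.com/bountonw/translate | th/PP/04_assets/convert_poetry.py | convert_blockquote
-- ===== SOURCE A (Python) =====
-- def parse_blockquote_line(line):
--     """Parse a blockquote line and return (indent_level, content).
--
--     indent_level: 0 for '> text', 1 for '> > text', etc.
--     content: the text after the blockquote markers.
--     """
--     count = 0
--     i = 0
--     while i < len(line):
--         if line[i] == '>':
--             count += 1
--             i += 1
--             # After '>', optionally skip one space
--             if i < len(line) and line[i] == ' ':
--                 i += 1
--         else:
--             break
--     content = line[i:]
--     indent_level = count - 1  # First '>' = level 0
--     return indent_level, content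
--
-- def convert_blockquote(collect):
--     """Convert a list of collected blockquote lines to a poetry block."""
--     poetry_lines = []
--     for line in collect:
--         if line == '' or line.strip() == '':
--             # Blank line (stanza break)
--             poetry_lines.append('')
--         elif line.startswith('>'):
--             indent_level, content = parse_blockquote_line(line)
--             if content.strip() == '':
--                 # Empty blockquote line (stanza break)
--                 poetry_lines.append('')
--             else:
--                 indent = '  ' * indent_level
--                 poetry_lines.append(indent + content)
--         else:
--             poetry_lines.append(line)
--
--     # Trim leading and trailing blank lines
--     while poetry_lines and poetry_lines[0] == '':
--         poetry_lines.pop(0)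
--     while poetry_lines and poetry_lines[-1] == '':
--         poetry_lines.pop()
--
--     return ['```poetry'] + poetry_lines + ['```']
-- ===== SOURCE B (Python) =====
-- def _classify(line):
--     """Map one collected line to its poetry form: '' for a stanza break,
--     the de-marked indented text for a '>' line, the line itself otherwise."""
--     if line.strip() == '':
--         return ''
--     if not line.startswith('>'):
--         return line
--     count = 0
--     rest = line
--     while rest.startswith('>'):
--         count += 1
--         rest = rest[1:]
--         if rest.startswith(' '):
--             rest = rest[1:]
--     if rest.strip() == '':
--         return ''
--     return '  ' * (count - 1) + rest
--
-- def convert_blockquote(collect):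
--     """Single pass with deferred blanks: leading blanks are ignored, interior
--     blanks are only emitted once the next non-blank line arrives, trailing
--     blanks stay in `pending` and are never emitted."""
--     result = []
--     pending = 0
--     started = False
--     for line in collect:
--         v = _classify(line)
--         if v == '':
--             if started:
--                 pending += 1
--         else:
--             result.extend([''] * pending)
--             pending = 0
--             result.append(v)
--             started = True
--     return ['```poetry'] + result + ['```']
-- ===== Notes on version B (the rewrite author's own statement) =====
-- stated objective: alternative
-- what changed: Instead of building the full mapped list and then popping leading/trailing blanks with two while-loops, B emits in a single pass with deferred blanks (a pending counter and a started flag), so the trim passes disappear.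
import Mathlib
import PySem

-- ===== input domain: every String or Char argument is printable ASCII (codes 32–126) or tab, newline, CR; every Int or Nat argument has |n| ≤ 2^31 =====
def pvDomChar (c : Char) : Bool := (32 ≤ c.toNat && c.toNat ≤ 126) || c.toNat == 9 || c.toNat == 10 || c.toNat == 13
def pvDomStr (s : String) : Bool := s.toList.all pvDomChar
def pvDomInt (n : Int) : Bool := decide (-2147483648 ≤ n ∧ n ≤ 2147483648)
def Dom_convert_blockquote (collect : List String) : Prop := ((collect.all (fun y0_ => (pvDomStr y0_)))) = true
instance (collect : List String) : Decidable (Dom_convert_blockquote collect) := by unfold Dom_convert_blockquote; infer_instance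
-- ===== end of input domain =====

-- B replaces A's build-then-trim (two while-loops popping leading/trailing blanks) by a single
-- pass with deferred blanks (pending counter + started flag); same cost, different decomposition.


-- ===== PORT A =====
-- A's parse_blockquote_line while-loop: consume '>', optionally one following space, repeat.
def pvParseLoop : List Char → Int → Int × List Char
  | c :: rest, count =>
      if c = '>' then
        match rest with
        | c2 :: rest2 =>
            if c2 = ' ' then pvParseLoop rest2 (count + 1)
            else pvParseLoop (c2 :: rest2) (count + 1)
        | [] => pvParseLoop [] (count + 1)
      else (count, c :: rest)
  | [], count => (count, [])

def parse_blockquote_line (line : String) : Int × String :=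
  let (count, content) := pvParseLoop line.toList 0
  (count - 1, String.ofList content)

-- Python's '  ' * n (empty for n ≤ 0, matching Int.toNat's clamp)
def pvStrTimes (cs : List Char) (n : Int) : List Char := (List.replicate n.toNat cs).flatten

-- while poetry_lines and poetry_lines[0] == '': pop(0)
def pvTrimFront : List String → List String
  | [] => []
  | s :: rest => if s = "" then pvTrimFront rest else s :: rest

-- while poetry_lines and poetry_lines[-1] == '': pop()
def pvTrimBack (l : List String) : List String :=
  if h : l.getLast? = some "" then pvTrimBack l.dropLast else l
termination_by l.length
decreasing_by
  have hne : l ≠ [] := by intro hn; subst hn; simp at h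
  have := List.length_pos_iff.mpr hne
  simp only [List.length_dropLast]; omega

def convert_blockquote (collect : List String) : List String :=
  let poetry := collect.foldl (fun acc line =>
    if line = "" ∨ PySem.Str.strip line = "" then acc ++ [""]
    else if PySem.Str.startswith line ">" then
      let (indent_level, content) := parse_blockquote_line line
      if PySem.Str.strip content = "" then acc ++ [""]
      else acc ++ [String.ofList (pvStrTimes "  ".toList indent_level ++ content.toList)]
    else acc ++ [line]) []
  "```poetry" :: pvTrimBack (pvTrimFront poetry) ++ ["```"]

-- ===== PORT B =====
-- B's marker loop: while rest.startswith('>'): drop it (and one optional space), count += 1.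
def pvBMarkers (rest : List Char) (count : Nat) : Nat × List Char :=
  if PySem.Chars.startswith rest ['>'] then
    let r1 := rest.drop 1
    pvBMarkers (if PySem.Chars.startswith r1 [' '] then r1.drop 1 else r1) (count + 1)
  else (count, rest)
termination_by rest.length
decreasing_by
  have hne : rest ≠ [] := by
    rename_i h; intro hn; subst hn; simp [PySem.Chars.startswith, List.isPrefixOf] at h
  have := List.length_pos_iff.mpr hne
  split <;> simp only [List.length_drop] <;> omega

-- B's _classify helper
def pvClassify (line : String) : String :=
  if PySem.Str.strip line = "" then ""
  else if !(PySem.Str.startswith line ">") then line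
  else
    let (count, rest) := pvBMarkers line.toList 0
    if PySem.Chars.strip rest = [] then ""
    else String.ofList ((List.replicate (count - 1) "  ".toList).flatten ++ rest)

-- B's single pass: result / pending / started
def pvEmit : List String → List String → Nat → Bool → List String
  | [], res, _pending, _started => res
  | line :: ls, res, pending, started =>
      let v := pvClassify line
      if v = "" then
        if started then pvEmit ls res (pending + 1) started
        else pvEmit ls res pending started
      else pvEmit ls (res ++ List.replicate pending "" ++ [v]) 0 true

def convert_blockquote_alt (collect : List String) : List String :=
  "```poetry" :: pvEmit collect [] 0 false ++ ["```"]

-- ===== PRECONDITION & SPEC =====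
def Spec_convert_blockquote (collect : List String) (out : List String) : Prop := out = convert_blockquote_alt collect
instance (collect : List String) (out : List String) : Decidable (Spec_convert_blockquote collect out) := by unfold Spec_convert_blockquote; infer_instance

-- ===== CLAIM (what is proved, stated in full; the proofs are below) =====
def Claim_equal_convert_blockquote : Prop := ∀ (collect : List String), Dom_convert_blockquote collect → Spec_convert_blockquote collect (convert_blockquote collect)

-- ===== LEMMAS AND PROOFS =====

-- trailing-blank trim as a reverse/dropWhile (proof-side characterisation)
def pvDT (l : List String) : List String := (l.reverse.dropWhile (· == "")).reverse

theorem pvDT_cons (v : String) (vs : List String) :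
    pvDT (v :: vs) = if v = "" ∧ pvDT vs = [] then [] else v :: pvDT vs := by
  unfold pvDT
  rw [List.reverse_cons, List.dropWhile_append]
  by_cases h : vs.reverse.dropWhile (· == "") = []
  · by_cases hv : v = "" <;> simp [h, hv]
  · simp [h]

theorem pvTrimBack_eq_pvDT (l : List String) : pvTrimBack l = pvDT l := by
  induction hl : l.length using Nat.strong_induction_on generalizing l with
  | _ k IH =>
    rw [pvTrimBack]
    rcases List.eq_nil_or_concat l with rfl | ⟨ys, a, rfl⟩
    · simp [pvDT]
    · rw [List.concat_eq_append] at *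
      by_cases ha : a = ""
      · subst ha
        have hlast : (ys ++ [("" : String)]).getLast? = some "" := by simp
        rw [dif_pos hlast, List.dropLast_concat]
        have hys : ys.length < k := by simp at hl; omega
        rw [IH ys.length hys ys rfl]
        unfold pvDT
        simp [List.dropWhile]
      · have hlast : (ys ++ [a]).getLast? = some a := by simp
        rw [dif_neg (by simp [hlast, ha])]
        unfold pvDT
        simp [List.dropWhile, ha]

-- the parse loops of A and B compute the same count and remainder
theorem pvParseLoop_eq_pvBMarkers (cs : List Char) (n : Nat) :
    pvParseLoop cs (n : Int) = (((pvBMarkers cs n).1 : Int), (pvBMarkers cs n).2) := by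
  induction hl : cs.length using Nat.strong_induction_on generalizing cs n with
  | _ k IH =>
    cases cs with
    | nil =>
      rw [pvBMarkers]
      simp [pvParseLoop, PySem.Chars.startswith, List.isPrefixOf]
    | cons c rest =>
      by_cases hc : c = '>'
      · subst hc
        rw [pvBMarkers,
            if_pos (by simp [PySem.Chars.startswith, List.isPrefixOf] : PySem.Chars.startswith ('>' :: rest) ['>'] = true)]
        have hcast : ((n : Int) + 1) = ((n + 1 : Nat) : Int) := by push_cast; ring
        cases rest with
        | nil =>
          simp only [pvParseLoop, if_pos rfl, List.drop_one, List.tail_cons]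
          rw [show PySem.Chars.startswith (([] : List Char)) [' '] = false from rfl]
          simp only [Bool.false_eq_true, if_false]
          rw [hcast]
          exact IH 0 (by simp at hl; omega) [] (n + 1) rfl
        | cons c2 rest2 =>
          by_cases h2 : c2 = ' '
          · subst h2
            simp only [pvParseLoop, if_pos rfl, List.drop_one, List.tail_cons]
            rw [if_pos (by simp [PySem.Chars.startswith, List.isPrefixOf] : PySem.Chars.startswith (' ' :: rest2) [' '] = true)]
            rw [hcast]
            exact IH rest2.length (by simp at hl; omega) rest2 (n + 1) rfl
          · have hsw2 : PySem.Chars.startswith (c2 :: rest2) [' '] = false := by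
              simp [PySem.Chars.startswith, List.isPrefixOf]
              exact fun h => h2 h.symm
            simp only [pvParseLoop, if_pos rfl, if_neg h2, List.drop_one, List.tail_cons]
            rw [hsw2]
            simp only [Bool.false_eq_true, if_false]
            rw [hcast]
            exact IH (rest2.length + 1) (by simp at hl; omega) (c2 :: rest2) (n + 1) (by simp)
      · have hsw : PySem.Chars.startswith (c :: rest) ['>'] = false := by
          simp [PySem.Chars.startswith, List.isPrefixOf]
          exact fun h => hc h.symm
        rw [pvBMarkers, if_neg (by simp [hsw]), pvParseLoop.eq_def]
        simp [hc]

-- Str-level strip-is-empty bridges to the Chars level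
theorem pvStrip_empty_iff (s : String) :
    (PySem.Str.strip s = "") ↔ (PySem.Chars.strip s.toList = []) := by
  constructor
  · intro h
    have := congrArg String.toList h
    simpa [PySem.Str.strip] using this
  · intro h
    simp [PySem.Str.strip, h]

-- B's classify equals the value A's loop body appends for the same line
theorem pvStep_eq (acc : List String) (line : String) :
    (if line = "" ∨ PySem.Str.strip line = "" then acc ++ [""]
     else if PySem.Str.startswith line ">" then
       let (indent_level, content) := parse_blockquote_line line
       if PySem.Str.strip content = "" then acc ++ [""]
       else acc ++ [String.ofList (pvStrTimes "  ".toList indent_level ++ content.toList)]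
     else acc ++ [line]) = acc ++ [pvClassify line] := by
  by_cases hs : PySem.Str.strip line = ""
  · rw [if_pos (Or.inr hs)]
    unfold pvClassify
    rw [if_pos hs]
  · have hA : ¬(line = "" ∨ PySem.Str.strip line = "") := by
      rintro (rfl | h)
      · exact hs rfl
      · exact hs h
    rw [if_neg hA]
    unfold pvClassify
    rw [if_neg hs]
    by_cases hp : PySem.Str.startswith line ">" = true
    · rcases hB : pvBMarkers line.toList 0 with ⟨cnt, rest⟩
      have hP : pvParseLoop line.toList 0 = ((cnt : Int), rest) := by
        have h0 := pvParseLoop_eq_pvBMarkers line.toList 0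
        rw [hB] at h0
        simpa using h0
      simp only [hp, Bool.not_true, Bool.false_eq_true, if_false, if_true,
        parse_blockquote_line, hP, hB]
      have htl : (String.ofList rest).toList = rest := by simp
      by_cases hrest : PySem.Chars.strip rest = []
      · rw [if_pos hrest, if_pos (by rw [pvStrip_empty_iff, htl]; exact hrest)]
      · rw [if_neg hrest, if_neg (by rw [pvStrip_empty_iff, htl]; exact hrest)]
        have hnat : ((cnt : Int) - 1).toNat = cnt - 1 := by omega
        simp [pvStrTimes, hnat, htl]
    · simp only [Bool.not_eq_true] at hp
      have hp' : PySem.Chars.startswith line.toList ['>'] = false := by simpa using hp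
      simp [hp, hp']

theorem pvFoldA_eq (l : List String) (acc : List String) :
    l.foldl (fun acc line =>
      if line = "" ∨ PySem.Str.strip line = "" then acc ++ [""]
      else if PySem.Str.startswith line ">" then
        let (indent_level, content) := parse_blockquote_line line
        if PySem.Str.strip content = "" then acc ++ [""]
        else acc ++ [String.ofList (pvStrTimes "  ".toList indent_level ++ content.toList)]
      else acc ++ [line]) acc = acc ++ l.map pvClassify := by
  rw [show (fun (acc : List String) (line : String) =>
      if line = "" ∨ PySem.Str.strip line = "" then acc ++ [""]
      else if PySem.Str.startswith line ">" then
        let (indent_level, content) := parse_blockquote_line line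
        if PySem.Str.strip content = "" then acc ++ [""]
        else acc ++ [String.ofList (pvStrTimes "  ".toList indent_level ++ content.toList)]
      else acc ++ [line]) = (fun acc line => acc ++ [pvClassify line]) from
    funext fun acc => funext fun line => pvStep_eq acc line]
  exact PySem.List.foldl_append_singleton_eq_map pvClassify l acc

theorem pvEmit_true (ls : List String) : ∀ (res : List String) (p : Nat),
    pvEmit ls res p true =
      res ++ (if pvDT (ls.map pvClassify) = [] then []
              else List.replicate p "" ++ pvDT (ls.map pvClassify)) := by
  induction ls with
  | nil => intro res p; simp [pvEmit, pvDT]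
  | cons l ls IH =>
    intro res p
    by_cases hv : pvClassify l = ""
    · simp only [pvEmit, hv, if_pos rfl, if_pos trivial, List.map_cons, pvDT_cons]
      rw [IH]
      by_cases hdt : pvDT (ls.map pvClassify) = []
      · simp [hdt, hv]
      · simp [hdt, hv, List.replicate_succ']
    · simp only [pvEmit, List.map_cons, pvDT_cons, if_neg hv]
      rw [IH]
      by_cases hdt : pvDT (ls.map pvClassify) = []
      · simp [hdt, hv]
      · simp [hdt, hv]

theorem pvEmit_false (ls : List String) : ∀ (res : List String),
    pvEmit ls res 0 false = res ++ pvDT (pvTrimFront (ls.map pvClassify)) := by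
  induction ls with
  | nil => intro res; simp [pvEmit, pvTrimFront, pvDT]
  | cons l ls IH =>
    intro res
    by_cases hv : pvClassify l = ""
    · simp only [pvEmit, hv, if_pos rfl, Bool.false_eq_true, if_false, List.map_cons]
      rw [IH]
      simp [pvTrimFront, hv]
    · simp only [pvEmit, if_neg hv, List.map_cons]
      rw [pvEmit_true]
      simp only [pvTrimFront, if_neg hv, pvDT_cons]
      by_cases hdt : pvDT (ls.map pvClassify) = []
      · simp [hdt, hv]
      · simp [hdt, hv]

-- ===== VERDICT (by name: the statement is the Claim_ definition above) =====
theorem convert_blockquote_spec : Claim_equal_convert_blockquote := by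
  intro collect _hdom
  simp only [Spec_convert_blockquote, convert_blockquote, convert_blockquote_alt]
  rw [pvFoldA_eq, pvEmit_false, pvTrimBack_eq_pvDT]
  simp
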